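-- pv_equiv track=rewrite | github.com/miliar/Code_Jam_Webscraper | solutions_python/Problem_201/676.py | compute_spaces
-- ===== SOURCE A (Python) =====
-- def compute_spaces(stalls):
-- 	"""Return list of (Ls, Rs), one for each location."""
-- 	left_spaces = []
-- 	right_spaces = []
--
-- 	last_left_filled_index = -1
-- 	for i in range(len(stalls)):
-- 		left_spaces.append(i - last_left_filled_index - 1)
-- 		if stalls[i]:
-- 			last_left_filled_index = i
--
-- 	last_right_filled_index = len(stalls)
-- 	for i in range(len(stalls) - 1, -1, -1):
-- 		right_spaces.append(last_right_filled_index - i - 1)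
-- 		if stalls[i]:
-- 			last_right_filled_index = i
-- 	right_spaces = list(reversed(right_spaces))
--
-- 	return [(i, left_spaces[i], right_spaces[i]) for i in range(len(stalls)) if not stalls[i]]
-- ===== SOURCE B (Python) =====
-- def compute_spaces(stalls):
--     """Return list of (Ls, Rs), one for each location."""
--     bounds = [-1] + [i for i, s in enumerate(stalls) if s] + [len(stalls)]
--     return [(i, i - p - 1, q - i - 1)
--             for p, q in zip(bounds, bounds[1:])
--             for i in range(p + 1, q)]
-- ===== Notes on version B (the rewrite author's own statement) =====
-- stated objective: simpler
-- what changed: Replaces A's two directional prefix scans (left pass, reversed right pass) plus a third filtering pass with one pass collecting filled-stall indices bracketed by sentinels -1 and len(stalls), then emitting each empty run between consecutive boundaries directly as (i, i-p-1, q-i-1).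
import Mathlib
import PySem

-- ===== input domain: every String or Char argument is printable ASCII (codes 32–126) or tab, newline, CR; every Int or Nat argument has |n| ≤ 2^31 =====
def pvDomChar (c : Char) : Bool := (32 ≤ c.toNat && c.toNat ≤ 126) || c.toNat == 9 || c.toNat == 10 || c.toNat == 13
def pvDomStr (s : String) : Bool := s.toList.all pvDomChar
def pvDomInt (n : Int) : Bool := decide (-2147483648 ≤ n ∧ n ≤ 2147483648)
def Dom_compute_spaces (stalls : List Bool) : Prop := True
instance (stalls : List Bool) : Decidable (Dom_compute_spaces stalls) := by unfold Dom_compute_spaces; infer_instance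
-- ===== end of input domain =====

-- B replaces A's two directional prefix scans plus a filtering pass by collecting the
-- filled-stall boundary indices once and emitting each empty run between consecutive
-- boundaries directly (simpler decomposition, same O(n) cost).

-- ===== PORT A =====
-- Loops append to a list while tracking the last filled index; state = (list, last index).
-- range(len(stalls)-1, -1, -1) enumerates n-1, n-2, …, 0, i.e. (List.range n).reverse (exact).
-- stalls[i] with 0 ≤ i < len is exactly stalls.getD i false.
def compute_spaces (stalls : List Bool) : List (Int × Int × Int) :=
  let n := stalls.length
  let s1 := (List.range n).foldl
      (fun (acc : List Int × Int) (i : Nat) =>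
        (acc.1 ++ [(i : Int) - acc.2 - 1], if stalls.getD i false then (i : Int) else acc.2))
      ([], -1)
  let left_spaces := s1.1
  let s2 := ((List.range n).reverse).foldl
      (fun (acc : List Int × Int) (i : Nat) =>
        (acc.1 ++ [acc.2 - (i : Int) - 1], if stalls.getD i false then (i : Int) else acc.2))
      ([], (n : Int))
  let right_spaces := s2.1.reverse
  (List.range n).filterMap (fun i =>
    if !(stalls.getD i false) then
      some ((i : Int), left_spaces.getD i 0, right_spaces.getD i 0)
    else none)

-- ===== PORT B =====
-- bounds = [-1] + [i for i, s in enumerate(stalls) if s] + [len(stalls)];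
-- then one triple per index of each empty run between consecutive boundary pairs.
def compute_spaces_alt (stalls : List Bool) : List (Int × Int × Int) :=
  let bounds : List Int :=
    -1 :: ((PySem.List.enumerate stalls).filterMap (fun p => if p.2 then some p.1 else none))
        ++ [(stalls.length : Int)]
  (bounds.zip bounds.tail).flatMap (fun pq =>
    (PySem.List.pyRange (pq.1 + 1) pq.2 1).map (fun i => (i, i - pq.1 - 1, pq.2 - i - 1)))

-- ===== PRECONDITION & SPEC =====
def Spec_compute_spaces (stalls : List Bool) (out : List (Int × Int × Int)) : Prop := out = compute_spaces_alt stalls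
instance (stalls : List Bool) (out : List (Int × Int × Int)) : Decidable (Spec_compute_spaces stalls out) := by unfold Spec_compute_spaces; infer_instance

-- ===== CLAIM (what is proved, stated in full; the proofs are below) =====
def Claim_equal_compute_spaces : Prop := ∀ (stalls : List Bool), Dom_compute_spaces stalls → Spec_compute_spaces stalls (compute_spaces stalls)

-- ===== LEMMAS AND PROOFS =====

-- last filled index strictly below j (sentinel -1), as A's left pass maintains it
def pvLf (s : List Bool) : Nat → Int
  | 0 => -1
  | j + 1 => if s.getD j false then (j : Int) else pvLf s j

-- next filled index at or above m (sentinel s.length)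
def pvNf (s : List Bool) (m : Nat) : Int :=
  (m : Int) + ((s.drop m).takeWhile (fun b => !b)).length

-- common reference function: current absolute index j, last filled index p
def pvRef (j p : Int) : List Bool → List (Int × Int × Int)
  | [] => []
  | true :: t => pvRef (j + 1) j t
  | false :: t =>
      (j, j - p - 1, ((t.takeWhile (fun b => !b)).length : Int)) :: pvRef (j + 1) p t

-- absolute indices of filled stalls in t, t starting at absolute index j
def pvFs (j : Int) : List Bool → List Int
  | [] => []
  | true :: t => j :: pvFs (j + 1) t
  | false :: t => pvFs (j + 1) t

def pvFirst (j : Int) (t : List Bool) : Int := (pvFs j t).headD (j + t.length)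

def pvEmit (pq : Int × Int) : List (Int × Int × Int) :=
  (PySem.List.pyRange (pq.1 + 1) pq.2 1).map (fun i => (i, i - pq.1 - 1, pq.2 - i - 1))

lemma pvNf_succ_sub (s : List Bool) (j : Nat) :
    pvNf s (j + 1) - (j : Int) - 1 = ((s.drop (j + 1)).takeWhile (fun b => !b)).length := by
  simp [pvNf]; ring

lemma pvNf_rec (s : List Bool) (k : Nat) (hk : k < s.length) :
    pvNf s k = if s.getD k false then (k : Int) else pvNf s (k + 1) := by
  have hd : s.drop k = s[k] :: s.drop (k + 1) := List.drop_eq_getElem_cons hk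
  rw [List.getD_eq_getElem s false hk]
  cases hsk : s[k] <;>
    simp [pvNf, hd, hsk, List.takeWhile_cons] <;> push_cast <;> ring

lemma pvNf_len (s : List Bool) : pvNf s s.length = (s.length : Int) := by
  simp [pvNf]

lemma foldl_left (s : List Bool) (m : Nat) :
    (List.range m).foldl
      (fun (acc : List Int × Int) (i : Nat) =>
        (acc.1 ++ [(i : Int) - acc.2 - 1], if s.getD i false then (i : Int) else acc.2))
      ([], -1)
    = ((List.range m).map (fun (j : Nat) => (j : Int) - pvLf s j - 1), pvLf s m) := by
  induction m with
  | zero => simp [pvLf]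
  | succ m ih =>
      rw [List.range_succ, List.foldl_append, ih]
      simp [pvLf]

lemma foldl_right (s : List Bool) (k : Nat) (hk : k ≤ s.length) (l : List Int) :
    ((List.range k).reverse).foldl
      (fun (acc : List Int × Int) (i : Nat) =>
        (acc.1 ++ [acc.2 - (i : Int) - 1], if s.getD i false then (i : Int) else acc.2))
      (l, pvNf s k)
    = (l ++ ((List.range k).reverse).map (fun (j : Nat) => pvNf s (j + 1) - (j : Int) - 1), pvNf s 0) := by
  induction k generalizing l with
  | zero => simp
  | succ k ih =>
      have hrev : (List.range (k + 1)).reverse = k :: (List.range k).reverse := by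
        rw [List.range_succ]; simp
      rw [hrev, List.foldl_cons]
      have hstep : (if s.getD k false then (k : Int) else pvNf s (k + 1)) = pvNf s k :=
        (pvNf_rec s k hk).symm
      rw [hstep, ih (Nat.le_of_succ_le hk) (l ++ [pvNf s (k + 1) - (k : Int) - 1])]
      simp

lemma drop_cons_facts (s : List Bool) (j : Nat) (b : Bool) (t : List Bool)
    (h : s.drop j = b :: t) :
    j < s.length ∧ s.getD j false = b ∧ s.drop (j + 1) = t := by
  have h1 : j < s.length := by
    have hlen := congrArg List.length h
    simp [List.length_drop] at hlen
    omega
  have h2 := List.drop_eq_getElem_cons h1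
  rw [h] at h2
  injection h2 with hb ht
  exact ⟨h1, by rw [List.getD_eq_getElem s false h1, hb], ht.symm⟩

lemma A_filterMap_eq_ref (s : List Bool) :
    ∀ (t : List Bool) (j : Nat) (p : Int), s.drop j = t → pvLf s j = p →
    (List.range' j t.length).filterMap
      (fun i => if !(s.getD i false) then
          some ((i : Int), (i : Int) - pvLf s i - 1, pvNf s (i + 1) - (i : Int) - 1)
        else none)
    = pvRef (j : Int) p t := by
  intro t
  induction t with
  | nil => intro j p _ _; simp [pvRef]
  | cons b t' ih =>
      intro j p hdrop hlf
      obtain ⟨hj, hb, ht⟩ := drop_cons_facts s j b t' hdrop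
      rw [List.length_cons, List.range'_succ, List.filterMap_cons]
      cases b with
      | true =>
          have hlf' : pvLf s (j + 1) = (j : Int) := by simp only [pvLf, hb]; simp
          rw [hb]
          simp only [Bool.not_true, reduceIte, pvRef]
          rw [ih (j + 1) (j : Int) ht hlf']
          push_cast
          rfl
      | false =>
          have hlf' : pvLf s (j + 1) = p := by simp only [pvLf, hb]; simpa using hlf
          rw [hb]
          simp only [Bool.not_false, reduceIte, pvRef]
          rw [ih (j + 1) p ht hlf', hlf, pvNf_succ_sub, ht]
          push_cast
          rfl

lemma A_eq_ref (s : List Bool) : compute_spaces s = pvRef 0 (-1) s := by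
  unfold compute_spaces
  dsimp only
  rw [foldl_left s s.length, ← pvNf_len s, foldl_right s s.length le_rfl []]
  simp only [List.nil_append, List.map_reverse, List.reverse_reverse]
  have hmain := A_filterMap_eq_ref s s 0 (-1) List.drop_zero rfl
  rw [← List.range_eq_range'] at hmain
  push_cast at hmain
  rw [← hmain]
  apply List.filterMap_congr
  intro i hi
  have hi' : i < s.length := List.mem_range.mp hi
  rw [List.getD_eq_getElem ((List.range s.length).map _) 0 (by simpa using hi'),
      List.getD_eq_getElem ((List.range s.length).map _) 0 (by simpa using hi')]
  simp [hi']

lemma pvFs_enumerate (s : List Bool) : ∀ (j : Int),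
    (PySem.List.enumerate s j).filterMap (fun p => if p.2 then some p.1 else none) = pvFs j s := by
  induction s with
  | nil => intro j; simp [PySem.List.enumerate_nil, pvFs]
  | cons b t ih =>
      intro j
      cases b <;> simp [PySem.List.enumerate_cons, pvFs, ih (j + 1)]

lemma pvFs_lb (t : List Bool) : ∀ (j : Int), ∀ x ∈ pvFs j t, j ≤ x := by
  induction t with
  | nil => intro j x hx; simp [pvFs] at hx
  | cons b t' ih =>
      intro j x hx
      cases b with
      | true =>
          simp only [pvFs, List.mem_cons] at hx
          rcases hx with rfl | hx
          · exact le_rfl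
          · linarith [ih (j + 1) x hx]
      | false =>
          simp only [pvFs] at hx
          linarith [ih (j + 1) x hx]

lemma pvFirst_ge (t : List Bool) (j : Int) : j ≤ pvFirst j t := by
  unfold pvFirst
  cases h : pvFs j t with
  | nil => simp
  | cons a l => simpa using pvFs_lb t j a (by simp [h])

lemma pvFirst_false (t : List Bool) (j : Int) :
    pvFirst j (false :: t) = pvFirst (j + 1) t := by
  cases h : pvFs (j + 1) t <;> simp [pvFirst, pvFs, h] <;> push_cast <;> ring

lemma pvFirst_cnt (t : List Bool) : ∀ (j : Int),
    pvFirst j t = j + ((t.takeWhile (fun b => !b)).length : Int) := by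
  induction t with
  | nil => intro j; simp [pvFirst, pvFs]
  | cons b t' ih =>
      intro j
      cases b with
      | true => simp [pvFirst, pvFs]
      | false =>
          rw [pvFirst_false, ih (j + 1)]
          simp [List.takeWhile_cons]
          push_cast
          ring

lemma head_bounds (j : Int) (t : List Bool) :
    pvFs j t ++ [j + (t.length : Int)] = pvFirst j t :: (pvFs j t ++ [j + (t.length : Int)]).tail := by
  cases h : pvFs j t <;> simp [pvFirst, h]

lemma seg (t : List Bool) : ∀ (j p : Int),
    pvRef j p t
    = (PySem.List.pyRange j (pvFirst j t) 1).map (fun i => (i, i - p - 1, pvFirst j t - i - 1))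
      ++ ((pvFs j t ++ [j + t.length]).zip ((pvFs j t ++ [j + t.length]).tail)).flatMap pvEmit := by
  induction t with
  | nil =>
      intro j p
      simp [pvRef, pvFs, pvFirst, PySem.List.pyRange_one_eq_nil le_rfl]
  | cons b t' ih =>
      intro j p
      have hsent : j + ((t'.length : Int) + 1) = (j + 1) + (t'.length : Int) := by ring
      cases b with
      | true =>
          have hfirst : pvFirst j (true :: t') = j := by simp [pvFirst, pvFs]
          have hB := head_bounds (j + 1) t'
          simp only [pvRef]
          rw [ih (j + 1) j, hfirst, PySem.List.pyRange_one_eq_nil le_rfl]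
          simp only [List.map_nil, List.nil_append, pvFs, List.length_cons]
          push_cast
          rw [hsent, List.cons_append, List.tail_cons, hB, List.zip_cons_cons, ← hB,
            List.flatMap_cons]
          simp [pvEmit]
      | false =>
          have hq : pvFirst j (false :: t') = pvFirst (j + 1) t' := pvFirst_false t' j
          have hgt : j < pvFirst (j + 1) t' :=
            lt_of_lt_of_le (by linarith) (pvFirst_ge t' (j + 1))
          have hcnt := pvFirst_cnt t' (j + 1)
          simp only [pvRef]
          rw [ih (j + 1) p, hq, PySem.List.pyRange_one_cons hgt]
          simp only [pvFs, List.length_cons, List.map_cons, List.cons_append]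
          push_cast
          rw [hsent]
          congr 3
          omega

lemma B_eq_ref (s : List Bool) : compute_spaces_alt s = pvRef 0 (-1) s := by
  unfold compute_spaces_alt
  dsimp only
  rw [pvFs_enumerate s 0]
  have hlam : (fun (pq : Int × Int) =>
      (PySem.List.pyRange (pq.1 + 1) pq.2 1).map (fun i => (i, i - pq.1 - 1, pq.2 - i - 1)))
      = pvEmit := rfl
  rw [hlam, show ((s.length : Int)) = 0 + (s.length : Int) from by ring]
  have hB := head_bounds 0 s
  rw [List.cons_append, List.tail_cons, hB, List.zip_cons_cons, ← hB, List.flatMap_cons, seg s 0 (-1)]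
  simp [pvEmit]

-- ===== VERDICT (by name: the statement is the Claim_ definition above) =====
theorem compute_spaces_spec : Claim_equal_compute_spaces := by
  intro s _
  unfold Spec_compute_spaces
  rw [A_eq_ref, B_eq_ref]
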